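-- pv_equiv track=rewrite | github.com/htpit1106/HTML-CSS-LEARN | test.py | kiem_tra_fibonacci
-- ===== SOURCE A (Python) =====
-- def kiem_tra_fibonacci(n):
--     a = 0
--     b = 1
--     while b < n:
--         temp = a
--         a = a+b
--         b = temp
--     if b%2 ==0 and b == n :
--         return True
--     else:
--         return False
-- ===== SOURCE B (Python) =====
-- def _isqrt(x):
--     # floor square root of a non-negative int, Newton's method
--     if x < 2:
--         return x
--     r = x
--     y = (r + x // r) // 2
--     while y < r:
--         r = y
--         y = (r + x // r) // 2
--     return r
--
--
-- def _is_square(x):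
--     r = _isqrt(x)
--     return r * r == x
--
--
-- def kiem_tra_fibonacci(n):
--     # n is an even Fibonacci number (>= 2) iff n is even and
--     # 5*n*n + 4 or 5*n*n - 4 is a perfect square
--     if n < 2 or n % 2 != 0:
--         return False
--     x = 5 * n * n
--     return _is_square(x + 4) or _is_square(x - 4)
-- ===== Notes on version B (the rewrite author's own statement) =====
-- stated objective: alternative
-- what changed: Replaces A's iterative Fibonacci-generation loop by the closed-form Gessel test: n is an even Fibonacci >= 2 iff n is even, n >= 2, and 5n^2+4 or 5n^2-4 is a perfect square (checked with a hand-written Newton integer square root).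
import Mathlib
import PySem

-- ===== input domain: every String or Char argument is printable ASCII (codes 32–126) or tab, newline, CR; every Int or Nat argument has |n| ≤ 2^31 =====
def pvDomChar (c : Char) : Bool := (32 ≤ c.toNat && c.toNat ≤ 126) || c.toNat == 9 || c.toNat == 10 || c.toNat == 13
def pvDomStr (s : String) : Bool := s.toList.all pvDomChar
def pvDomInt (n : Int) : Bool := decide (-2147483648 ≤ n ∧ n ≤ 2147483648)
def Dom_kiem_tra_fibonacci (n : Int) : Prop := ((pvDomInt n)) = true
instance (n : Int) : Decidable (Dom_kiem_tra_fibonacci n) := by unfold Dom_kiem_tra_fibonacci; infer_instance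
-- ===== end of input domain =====

-- B replaces A's Fibonacci-generation loop by the perfect-square test:
-- n is an even Fibonacci ≥ 2 iff n is even, n ≥ 2, and 5n²+4 or 5n²−4 is a
-- perfect square (checked with a hand-written Newton integer square root).

-- ===== PORT A =====
-- while b < n: temp = a; a = a + b; b = temp   (fuel-guarded; 100 steps suffice on Dom)
def pvLoopA (n : Int) (a b : Int) : Nat → Int × Int
  | 0 => (a, b)
  | f + 1 => if b < n then pvLoopA n (a + b) a f else (a, b)

def kiem_tra_fibonacci (n : Int) : Bool :=
  let p := pvLoopA n 0 1 100
  decide (PySem.Int.mod p.2 2 = 0 ∧ p.2 = n)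

-- ===== PORT B =====
-- y = (r + x // r) // 2, one Newton step of Source B's _isqrt
def pvNewtonStep (x r : Int) : Int :=
  PySem.Int.floordiv (r + PySem.Int.floordiv x r) 2

-- while y < r: r = y; y = (r + x // r) // 2   (fuel-guarded; r strictly decreases)
def pvNewtonLoop (x r y : Int) : Nat → Int
  | 0 => r
  | f + 1 => if y < r then pvNewtonLoop x y (pvNewtonStep x y) f else r

-- Source B's _isqrt
def pvIsqrt (x : Int) : Int :=
  if x < 2 then x else pvNewtonLoop x x (pvNewtonStep x x) x.toNat

-- Source B's _is_square
def pvIsSquare (x : Int) : Bool :=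
  let r := pvIsqrt x
  decide (r * r = x)

def kiem_tra_fibonacci_alt (n : Int) : Bool :=
  if n < 2 ∨ PySem.Int.mod n 2 ≠ 0 then false
  else
    let x := 5 * n * n
    pvIsSquare (x + 4) || pvIsSquare (x - 4)

-- ===== PRECONDITION & SPEC =====
def Spec_kiem_tra_fibonacci (n : Int) (out : Bool) : Prop := out = kiem_tra_fibonacci_alt n
instance (n : Int) (out : Bool) : Decidable (Spec_kiem_tra_fibonacci n out) := by unfold Spec_kiem_tra_fibonacci; infer_instance

-- ===== CLAIM (what is proved, stated in full; the proofs are below) =====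
def Claim_equal_kiem_tra_fibonacci : Prop := ∀ (n : Int), Dom_kiem_tra_fibonacci n → Spec_kiem_tra_fibonacci n (kiem_tra_fibonacci n)

-- ===== LEMMAS AND PROOFS =====

-- ---- Newton isqrt correctness ----

lemma pvNewtonStep_ge (x r : Int) (hx : 0 ≤ x)
    (hs : (Nat.sqrt x.toNat : Int) ≤ r) (hs1 : 1 ≤ (Nat.sqrt x.toNat : Int)) :
    (Nat.sqrt x.toNat : Int) ≤ pvNewtonStep x r := by
  set s : Int := (Nat.sqrt x.toNat : Int) with hsdef
  have hr : 0 < r := lt_of_lt_of_le hs1 hs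
  have hq := PySem.Int.floordiv_mul_add_mod x r
  have hm0 : 0 ≤ PySem.Int.mod x r := PySem.Int.mod_nonneg x hr
  have hm1 : PySem.Int.mod x r < r := PySem.Int.mod_lt x hr
  set q : Int := PySem.Int.floordiv x r with hqdef
  have hss : s * s ≤ x := by
    have h1 : Nat.sqrt x.toNat * Nat.sqrt x.toNat ≤ x.toNat := by
      have h := Nat.sqrt_le' x.toNat
      rwa [Nat.pow_two] at h
    have hx' : ((x.toNat : Int)) = x := Int.toNat_of_nonneg hx
    calc s * s = ((Nat.sqrt x.toNat * Nat.sqrt x.toNat : Nat) : Int) := by push_cast; ring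
    _ ≤ ((x.toNat : Nat) : Int) := by exact_mod_cast h1
    _ = x := hx'
  unfold pvNewtonStep
  rw [← hqdef, PySem.Int.le_floordiv_iff_mul_le (by norm_num : (0:Int) < 2)]
  nlinarith [sq_nonneg (q + 1 - r)]

lemma pvNewtonStep_lt (x r : Int) (hx : 0 ≤ x)
    (hlt : x < ((Nat.sqrt x.toNat : Int) + 1) * ((Nat.sqrt x.toNat : Int) + 1))
    (hr : (Nat.sqrt x.toNat : Int) + 1 ≤ r) :
    pvNewtonStep x r < r := by
  set s : Int := (Nat.sqrt x.toNat : Int) with hsdef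
  have hs0 : 0 ≤ s := by positivity
  have hrpos : 0 < r := by omega
  have hq := PySem.Int.floordiv_mul_add_mod x r
  have hm0 : 0 ≤ PySem.Int.mod x r := PySem.Int.mod_nonneg x hrpos
  set q : Int := PySem.Int.floordiv x r with hqdef
  have hxr : x < r * r := lt_of_lt_of_le hlt (by nlinarith)
  have hqr : q < r := by nlinarith
  unfold pvNewtonStep
  rw [← hqdef, PySem.Int.floordiv_lt_iff_lt_mul (by norm_num : (0:Int) < 2)]
  omega

lemma pvNewtonLoop_eq (x : Int) (hx : 0 ≤ x)
    (hs1 : 1 ≤ (Nat.sqrt x.toNat : Int)) :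
    ∀ (f : Nat) (r : Int), (Nat.sqrt x.toNat : Int) ≤ r → r ≤ (f : Int) + (Nat.sqrt x.toNat : Int) →
      pvNewtonLoop x r (pvNewtonStep x r) f = (Nat.sqrt x.toNat : Int) := by
  have hlt : x < ((Nat.sqrt x.toNat : Int) + 1) * ((Nat.sqrt x.toNat : Int) + 1) := by
    have h1 : x.toNat < (Nat.sqrt x.toNat + 1) * (Nat.sqrt x.toNat + 1) := by
      have h := Nat.lt_succ_sqrt' x.toNat
      rwa [Nat.pow_two] at h
    have hx' : ((x.toNat : Int)) = x := Int.toNat_of_nonneg hx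
    calc x = ((x.toNat : Nat) : Int) := hx'.symm
    _ < (((Nat.sqrt x.toNat + 1) * (Nat.sqrt x.toNat + 1) : Nat) : Int) := by exact_mod_cast h1
    _ = ((Nat.sqrt x.toNat : Int) + 1) * ((Nat.sqrt x.toNat : Int) + 1) := by push_cast; ring
  intro f
  induction f with
  | zero =>
    intro r h1 h2
    have hr : r = (Nat.sqrt x.toNat : Int) := by omega
    rw [show pvNewtonLoop x r (pvNewtonStep x r) 0 = r from rfl, hr]
  | succ f ih =>
    intro r h1 h2
    by_cases hc : pvNewtonStep x r < r
    · have hge := pvNewtonStep_ge x r hx h1 hs1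
      simp only [pvNewtonLoop, if_pos hc]
      exact ih (pvNewtonStep x r) hge (by push_cast; omega)
    · have hr : r = (Nat.sqrt x.toNat : Int) := by
        by_contra hne
        have hgt : (Nat.sqrt x.toNat : Int) + 1 ≤ r := by omega
        exact hc (pvNewtonStep_lt x r hx hlt hgt)
      simp only [pvNewtonLoop, if_neg hc]
      exact hr

lemma pvIsqrt_eq (x : Int) (hx : 0 ≤ x) : pvIsqrt x = (Nat.sqrt x.toNat : Int) := by
  unfold pvIsqrt
  by_cases h2 : x < 2
  · rw [if_pos h2]
    interval_cases x <;> decide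
  · rw [if_neg h2]
    have hx2 : 2 ≤ x := by omega
    have hs1 : 1 ≤ (Nat.sqrt x.toNat : Int) := by
      have h1 : 1 ≤ Nat.sqrt x.toNat := Nat.le_sqrt.mpr (by omega)
      exact_mod_cast h1
    have hsle : (Nat.sqrt x.toNat : Int) ≤ x := by
      have h1 := Nat.sqrt_le_self x.toNat
      have hx' : ((x.toNat : Int)) = x := Int.toNat_of_nonneg hx
      calc (Nat.sqrt x.toNat : Int) ≤ (x.toNat : Int) := by exact_mod_cast h1
      _ = x := hx'
    exact pvNewtonLoop_eq x hx hs1 x.toNat x hsle (by omega)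

lemma pvIsSquare_iff (x : Int) (hx : 0 ≤ x) :
    pvIsSquare x = true ↔ ∃ m : Int, 0 ≤ m ∧ m * m = x := by
  unfold pvIsSquare
  rw [pvIsqrt_eq x hx]
  simp only [decide_eq_true_eq]
  constructor
  · intro h
    exact ⟨(Nat.sqrt x.toNat : Int), by positivity, h⟩
  · rintro ⟨m, hm0, hmx⟩
    have hcast : ((m.toNat * m.toNat : Nat) : Int) = x := by
      push_cast [Int.toNat_of_nonneg hm0]; exact hmx
    have hxt : x.toNat = m.toNat * m.toNat := by omega
    have hsq : Nat.sqrt x.toNat = m.toNat := by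
      rw [hxt, ← Nat.pow_two, Nat.sqrt_eq']
    rw [hsq, Int.toNat_of_nonneg hm0]
    exact hmx

-- ---- Fibonacci identities ----

lemma fib_cast_add_two (j : Nat) :
    (Nat.fib (j+2) : Int) = Nat.fib j + Nat.fib (j+1) := by
  rw [Nat.fib_add_two]; push_cast; ring

-- Cassini-type identity: F(k+1)² − F(k+1)F(k) − F(k)² = (−1)^k
lemma fib_cassini (k : Nat) :
    (Nat.fib (k+1) : Int) * Nat.fib (k+1) - Nat.fib (k+1) * Nat.fib k - Nat.fib k * Nat.fib k = (-1) ^ k := by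
  induction k with
  | zero => norm_num
  | succ k ih =>
    have h2 := fib_cast_add_two k
    rw [show k+1+1 = k+2 from rfl, h2, pow_succ]
    linear_combination (-1 : Int) * ih

-- L(k)² − 5 F(k)² = 4·(−1)^k   with L(k) = 2F(k+1) − F(k)
lemma lucas_identity (k : Nat) :
    (2 * (Nat.fib (k+1) : Int) - Nat.fib k) * (2 * (Nat.fib (k+1) : Int) - Nat.fib k)
      - 5 * ((Nat.fib k : Int) * Nat.fib k) = 4 * (-1) ^ k := by
  linear_combination (4 : Int) * fib_cassini k

lemma lucas_nonneg (k : Nat) : 0 ≤ 2 * (Nat.fib (k+1) : Int) - Nat.fib k := by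
  have h1 : Nat.fib k ≤ Nat.fib (k+1) := Nat.fib_mono (by omega)
  have h2 : (Nat.fib k : Int) ≤ Nat.fib (k+1) := by exact_mod_cast h1
  omega

-- Descent (Gessel's test, hard direction): every nonnegative solution of
-- x² − 5y² = ±4 is (L k, F k) for some k.
lemma pell_fib (y : Nat) : ∀ x : Nat,
    ((x : Int) * x - 5 * ((y : Int) * y) = 4 ∨ (x : Int) * x - 5 * ((y : Int) * y) = -4) →
    ∃ k, (y : Int) = Nat.fib k ∧ (x : Int) = 2 * (Nat.fib (k+1) : Int) - Nat.fib k := by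
  induction y using Nat.strong_induction_on with
  | _ y ih =>
    intro x hx
    match y, ih with
    | 0, _ =>
      refine ⟨0, by norm_num, ?_⟩
      have hx2 : (x : Int) * x = 4 := by
        rcases hx with h | h
        · push_cast at h ⊢; linarith
        · exfalso; push_cast at h; nlinarith [sq_nonneg (x : Int)]
      have hx0 : (0 : Int) ≤ x := by positivity
      have hxe : (x : Int) = 2 := by nlinarith
      rw [hxe]; decide
    | 1, _ =>
      rcases hx with h | h
      · refine ⟨2, by decide, ?_⟩
        have hx9 : (x : Int) * x = 9 := by push_cast at h ⊢; linarith
        have hx0 : (0 : Int) ≤ x := by positivity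
        have hxe : (x : Int) = 3 := by nlinarith
        rw [hxe]; decide
      · refine ⟨1, by decide, ?_⟩
        have hx1 : (x : Int) * x = 1 := by push_cast at h ⊢; linarith
        have hx0 : (0 : Int) ≤ x := by positivity
        have hxe : (x : Int) = 1 := by nlinarith
        rw [hxe]; decide
    | (c + 2), ih =>
      -- name Y := ↑(c+2) and X := ↑x
      obtain ⟨Y, hYdef⟩ : ∃ Y : Int, Y = ((c + 2 : Nat) : Int) := ⟨_, rfl⟩
      obtain ⟨X, hXdef⟩ : ∃ X : Int, X = ((x : Nat) : Int) := ⟨_, rfl⟩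
      rw [← hYdef, ← hXdef] at hx ⊢
      have hY2 : 2 ≤ Y := by rw [hYdef]; push_cast; omega
      have hX0 : 0 ≤ X := by rw [hXdef]; positivity
      -- X and Y have the same parity
      have heven : Even (X + Y) := by
        have h1 : Even (X * X - Y * Y) := by
          rcases hx with h | h
          · exact ⟨2 * (Y * Y) + 2, by linarith⟩
          · exact ⟨2 * (Y * Y) - 2, by linarith⟩
        rw [Int.even_sub] at h1
        have h2 : (Even X ↔ Even Y) := by simpa [Int.even_mul] using h1
        rw [Int.even_add]; exact h2
      obtain ⟨t, ht⟩ := heven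
      have hXt : X = 2 * t - Y := by omega
      -- descent step: (u, v) = ((3X−5Y)/2, (3Y−X)/2)
      obtain ⟨u, hu⟩ : ∃ u : Int, u = 3 * t - 4 * Y := ⟨_, rfl⟩
      obtain ⟨v, hv⟩ : ∃ v : Int, v = 2 * Y - t := ⟨_, rfl⟩
      have hpell' : u * u - 5 * (v * v) = 4 ∨ u * u - 5 * (v * v) = -4 := by
        have he : u * u - 5 * (v * v) = X * X - 5 * (Y * Y) := by
          rw [hu, hv, hXt]; ring
        rw [he]; exact hx
      -- bounds
      have hXY : Y < X := by
        by_contra hcon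
        have hle : X ≤ Y := by omega
        have hp : 0 ≤ (Y - X) * (Y + X) := mul_nonneg (by linarith) (by linarith)
        rcases hx with h | h <;> nlinarith [mul_self_nonneg (Y - 2)]
      have hX3Y : X ≤ 3 * Y := by
        by_contra hcon
        have hle : 3 * Y + 1 ≤ X := by omega
        have hp : (3 * Y + 1) * (3 * Y + 1) ≤ X * X :=
          mul_le_mul hle hle (by linarith) (by linarith)
        rcases hx with h | h <;> nlinarith [mul_self_nonneg (Y - 2)]
      have h5Y3X : 5 * Y ≤ 3 * X := by
        by_contra hcon
        have hle : 3 * X ≤ 5 * Y - 1 := by omega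
        have hp : (3 * X) * (3 * X) ≤ (5 * Y - 1) * (5 * Y - 1) :=
          mul_le_mul hle hle (by linarith) (by linarith)
        rcases hx with h | h <;> nlinarith [mul_self_nonneg (Y - 2)]
      have hv0 : 0 ≤ v := by omega
      have hvY : v < Y := by omega
      have hu0 : 0 ≤ u := by omega
      -- apply the induction hypothesis at v < Y
      have hvlt : v.toNat < c + 2 := by omega
      have hvcast : ((v.toNat : Nat) : Int) = v := Int.toNat_of_nonneg hv0
      have hucast : ((u.toNat : Nat) : Int) = u := Int.toNat_of_nonneg hu0
      obtain ⟨k, hk1, hk2⟩ := ih v.toNat hvlt u.toNat (by rw [hucast, hvcast]; exact hpell')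
      rw [hvcast] at hk1
      rw [hucast] at hk2
      -- ascend: Y = F(k+2), X = L(k+2)
      have hf2 := fib_cast_add_two k
      have hf3 : (Nat.fib (k+3) : Int) = Nat.fib (k+1) + Nat.fib (k+2) := by
        have h := fib_cast_add_two (k+1)
        have e1 : k+1+2 = k+3 := by omega
        have e2 : k+1+1 = k+2 := by omega
        rw [e1, e2] at h
        exact h
      have h2Y : 2 * Y = u + 3 * v := by omega
      have hYf : Y = (Nat.fib (k+2) : Int) := by rw [hf2]; linarith
      refine ⟨k + 2, hYf, ?_⟩
      have e3 : k+2+1 = k+3 := by omega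
      rw [e3, hf3]
      -- X = 3Y − 2v
      have hX3 : X = 3 * Y - 2 * v := by omega
      rw [hX3, hYf, hf2]; linarith

-- ---- characterisation of A's loop ----

lemma pvLoopA_done (n a b : Int) (h : ¬ b < n) : ∀ f, pvLoopA n a b f = (a, b) := by
  intro f; cases f with
  | zero => rfl
  | succ f => simp [pvLoopA, h]

lemma pvLoopA_run (n : Int) (hn : 2 ≤ n) :
    ∀ (f j : Nat), (Nat.fib (j+1) : Int) < n → n ≤ (Nat.fib (j+1+f) : Int) →
    ∃ m : Nat,
      pvLoopA n (Nat.fib (j+2)) (Nat.fib (j+1)) f = ((Nat.fib (m+2) : Int), (Nat.fib (m+1) : Int)) ∧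
      n ≤ (Nat.fib (m+1) : Int) ∧ (Nat.fib m : Int) < n := by
  intro f
  induction f with
  | zero =>
    intro j h1 h2
    exfalso
    have e : j+1+0 = j+1 := by omega
    rw [e] at h2
    omega
  | succ f ih =>
    intro j h1 h2
    have hsum : (Nat.fib (j+2) : Int) + (Nat.fib (j+1)) = (Nat.fib (j+3) : Int) := by
      have h := fib_cast_add_two (j+1)
      have e1 : j+1+2 = j+3 := by omega
      have e2 : j+1+1 = j+2 := by omega
      rw [e1, e2] at h
      linarith
    have e1 : j+1+2 = j+3 := by omega
    have e2 : j+1+1 = j+2 := by omega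
    by_cases hc : (Nat.fib (j+2) : Int) < n
    · have h2' : n ≤ (Nat.fib (j+1+1+f) : Int) := by
        have e : j+1+1+f = j+1+(f+1) := by omega
        rw [e]; exact h2
      obtain ⟨m, hres, hge, hlt⟩ := ih (j+1) (by rw [e2]; exact hc) h2'
      rw [e1, e2] at hres
      refine ⟨m, ?_, hge, hlt⟩
      show (if ((Nat.fib (j+1) : Int)) < n then
              pvLoopA n ((Nat.fib (j+2) : Int) + (Nat.fib (j+1))) ((Nat.fib (j+2) : Int)) f
            else ((Nat.fib (j+2) : Int), (Nat.fib (j+1) : Int))) = _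
      rw [if_pos h1, hsum]
      exact hres
    · refine ⟨j+1, ?_, ?_, ?_⟩
      · show (if ((Nat.fib (j+1) : Int)) < n then
                pvLoopA n ((Nat.fib (j+2) : Int) + (Nat.fib (j+1))) ((Nat.fib (j+2) : Int)) f
              else ((Nat.fib (j+2) : Int), (Nat.fib (j+1) : Int))) = _
        rw [if_pos h1, hsum, pvLoopA_done n _ _ hc f, e1, e2]
      · rw [e2]; omega
      · exact h1

-- fib 47 already exceeds 2^31, so fib 99 does too
lemma fib_big : (2147483648 : Int) ≤ (Nat.fib 99 : Int) := by
  have h47 : Nat.fib 47 = 2971215073 := by decide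
  have hm : Nat.fib 47 ≤ Nat.fib 99 := Nat.fib_mono (by omega)
  have h : (2147483648 : Nat) ≤ Nat.fib 99 := by omega
  exact_mod_cast h

lemma fib_le_of_le {a b : Nat} (h : a ≤ b) : (Nat.fib a : Int) ≤ (Nat.fib b : Int) := by
  exact_mod_cast Nat.fib_mono h

-- main case analysis for 2 ≤ n
lemma main_ge_two (n : Int) (hn : 2 ≤ n) (hdom : n ≤ 2147483648) :
    kiem_tra_fibonacci n = kiem_tra_fibonacci_alt n := by
  have h10 : (1 : Int) < n := by omega
  have h00 : (0 : Int) < n := by omega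
  -- unfold A's first two iterations: (0,1) → (1,0) → (1,1)
  have hloop : pvLoopA n 0 1 100 = pvLoopA n 1 1 98 := by
    have e1 : pvLoopA n 0 1 100 = if (1:Int) < n then pvLoopA n (0+1) 0 99 else (0,1) := rfl
    have e2 : pvLoopA n 1 0 99 = if (0:Int) < n then pvLoopA n (1+0) 1 98 else (1,0) := rfl
    rw [e1, if_pos h10]; norm_num; rw [e2, if_pos h00]; norm_num
  have hf1 : ((Nat.fib (0+1) : Nat) : Int) = 1 := by norm_num
  have hf99 : n ≤ ((Nat.fib (0+1+98) : Nat) : Int) := by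
    have e : 0+1+98 = 99 := by omega
    rw [e]
    exact le_trans hdom fib_big
  obtain ⟨m, hres, hge, hlt⟩ := pvLoopA_run n hn 98 0 (by rw [hf1]; exact h10) hf99
  have e02 : (0:Nat)+2 = 2 := by omega
  have e01 : (0:Nat)+1 = 1 := by omega
  rw [e02, e01, show ((Nat.fib 2 : Nat) : Int) = 1 by decide,
      show ((Nat.fib 1 : Nat) : Int) = 1 by decide] at hres
  have hA : kiem_tra_fibonacci n
      = decide (PySem.Int.mod ((Nat.fib (m+1) : Nat) : Int) 2 = 0 ∧ ((Nat.fib (m+1) : Nat) : Int) = n) := by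
    unfold kiem_tra_fibonacci
    rw [hloop, hres]
  rw [hA]
  by_cases hpar : PySem.Int.mod n 2 = 0
  case neg =>
    have hB : kiem_tra_fibonacci_alt n = false := by
      unfold kiem_tra_fibonacci_alt
      rw [if_pos (Or.inr hpar)]
    rw [hB]
    simp only [decide_eq_false_iff_not]
    rintro ⟨hev, heq⟩
    rw [heq] at hev
    exact hpar hev
  case pos =>
    have hB : kiem_tra_fibonacci_alt n
        = (pvIsSquare (5 * n * n + 4) || pvIsSquare (5 * n * n - 4)) := by
      unfold kiem_tra_fibonacci_alt
      rw [if_neg (by push_neg; exact ⟨by omega, hpar⟩)]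
    rw [hB]
    have hxp : (0:Int) ≤ 5 * n * n + 4 := by nlinarith [mul_self_nonneg n]
    have hxm : (0:Int) ≤ 5 * n * n - 4 := by nlinarith [mul_self_nonneg (n - 2)]
    rw [Bool.eq_iff_iff]
    simp only [Bool.or_eq_true, decide_eq_true_eq, pvIsSquare_iff _ hxp, pvIsSquare_iff _ hxm]
    constructor
    · rintro ⟨hev, heq⟩
      -- A true: n = fib (m+1); produce the square via the Lucas identity
      have hid := lucas_identity (m+1)
      have hL0 := lucas_nonneg (m+1)
      rcases Nat.even_or_odd (m+1) with hke | hko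
      · left
        refine ⟨2 * ((Nat.fib (m+1+1) : Nat) : Int) - ((Nat.fib (m+1) : Nat) : Int), hL0, ?_⟩
        rw [Even.neg_one_pow hke] at hid
        rw [← heq]
        linear_combination hid
      · right
        refine ⟨2 * ((Nat.fib (m+1+1) : Nat) : Int) - ((Nat.fib (m+1) : Nat) : Int), hL0, ?_⟩
        rw [Odd.neg_one_pow hko] at hid
        rw [← heq]
        linear_combination hid
    · intro hsq
      -- B true: n is a Fibonacci number; minimality forces fib (m+1) = n
      have hn0 : ((n.toNat : Nat) : Int) = n := Int.toNat_of_nonneg (by omega)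
      have hfib : ∃ k, (n : Int) = ((Nat.fib k : Nat) : Int) := by
        rcases hsq with ⟨w, hw0, hw⟩ | ⟨w, hw0, hw⟩
        · have hwc : ((w.toNat : Nat) : Int) = w := Int.toNat_of_nonneg hw0
          obtain ⟨k, hk1, hk2⟩ := pell_fib n.toNat w.toNat
            (Or.inl (by rw [hwc, hn0]; linear_combination hw))
          exact ⟨k, by rw [← hn0, hk1]⟩
        · have hwc : ((w.toNat : Nat) : Int) = w := Int.toNat_of_nonneg hw0
          obtain ⟨k, hk1, hk2⟩ := pell_fib n.toNat w.toNat
            (Or.inr (by rw [hwc, hn0]; linear_combination hw))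
          exact ⟨k, by rw [← hn0, hk1]⟩
      obtain ⟨k, hk⟩ := hfib
      have hmk : m < k := by
        by_contra hle
        have hle' : k ≤ m := by omega
        have := fib_le_of_le hle'
        omega
      have h1 : ((Nat.fib (m+1) : Nat) : Int) ≤ ((Nat.fib k : Nat) : Int) := fib_le_of_le (by omega)
      have heq : ((Nat.fib (m+1) : Nat) : Int) = n := by omega
      exact ⟨by rw [heq]; exact hpar, heq⟩

-- ===== VERDICT (by name: the statement is the Claim_ definition above) =====
theorem kiem_tra_fibonacci_spec : Claim_equal_kiem_tra_fibonacci := by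
  intro n hdom
  unfold Spec_kiem_tra_fibonacci
  by_cases hn : 2 ≤ n
  · have hdom' : n ≤ 2147483648 := by
      unfold Dom_kiem_tra_fibonacci pvDomInt at hdom
      simpa using (of_decide_eq_true hdom).2
    exact main_ge_two n hn hdom'
  · -- n < 2: A's loop does not run (b = 1 ≥ n), both sides are false
    have hA : kiem_tra_fibonacci n = false := by
      unfold kiem_tra_fibonacci
      rw [pvLoopA_done n 0 1 (by omega) 100]
      simp
    have hB : kiem_tra_fibonacci_alt n = false := by
      unfold kiem_tra_fibonacci_alt
      rw [if_pos (Or.inl (by omega))]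
    rw [hA, hB]
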